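-- pv_equiv track=rewrite | github.com/sherry0303/code1161base | week3/exercise1.py | gene_krupa_range
-- ===== SOURCE A (Python) =====
-- def gene_krupa_range(start, stop, even_step, odd_step):
--     """Make a range that has two step sizes.
--
--     make a list that instead of having evenly spaced steps
--     has odd steps be one size and even steps be another.
--     """
--     '''combined_list = sorted(set(list(range(start, stop, even_step) +
--                            range(start, stop, odd_step))))
--
--     return combined_list'''
--     range_list = []
--
--     while start < stop:
--         range_list.append(start)
--         start = start + even_step
--         if start < stop:
--             range_list.append(start)
--             start = start + odd_step
--         else:
--             start = start
--     return range_list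
-- ===== SOURCE B (Python) =====
-- def gene_krupa_range(start, stop, even_step, odd_step):
--     """Make a range that has two step sizes.
--
--     Closed-form decomposition: the output is a sequence of (up to) pairs
--     (s, s+even_step) whose first elements form an arithmetic progression
--     with combined step pair = even_step + odd_step.  Compute the number of
--     pair starts below stop by ceiling division, then emit each pair by
--     index, breaking early when the even step already crosses stop.
--     """
--     if stop <= start:
--         return []
--     pair = even_step + odd_step
--     if pair <= 0:
--         # the combined step does not advance, so (on terminating inputs)
--         # the very first even step already reaches stop
--         return [start]
--     npairs = -((start - stop) // pair)  # ceil((stop - start) / pair)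
--     out = []
--     for j in range(npairs):
--         s = start + j * pair
--         out.append(s)
--         t = s + even_step
--         if t >= stop:
--             break
--         out.append(t)
--     return out
-- ===== Notes on version B (the rewrite author's own statement) =====
-- stated objective: alternative
-- what changed: Instead of A's while-loop with a mutated cursor and an unrolled double body, B computes the number of pair-starts in closed form by ceiling division and emits each pair by index (s = start + j*pair), breaking early when the even step crosses stop; Pre_ only excludes the inputs on which A loops forever (start < stop, start+even_step < stop, even_step+odd_step <= 0).
import Mathlib
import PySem

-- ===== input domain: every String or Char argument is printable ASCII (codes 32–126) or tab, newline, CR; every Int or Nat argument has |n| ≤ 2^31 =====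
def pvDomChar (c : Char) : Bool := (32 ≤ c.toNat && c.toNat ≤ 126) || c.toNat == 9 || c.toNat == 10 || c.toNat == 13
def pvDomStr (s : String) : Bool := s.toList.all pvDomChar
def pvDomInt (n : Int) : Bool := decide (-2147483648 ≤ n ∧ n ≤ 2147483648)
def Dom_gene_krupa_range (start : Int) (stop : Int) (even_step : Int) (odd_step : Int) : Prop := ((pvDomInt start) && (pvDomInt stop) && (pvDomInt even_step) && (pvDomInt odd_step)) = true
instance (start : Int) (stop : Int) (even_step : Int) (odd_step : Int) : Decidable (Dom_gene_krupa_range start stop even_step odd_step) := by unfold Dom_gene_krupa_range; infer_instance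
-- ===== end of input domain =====

-- B replaces A's while-loop (mutated cursor, unrolled double body) by a
-- closed-form count of pair starts (ceiling division) and an indexed emit
-- with early break (objective: alternative, same cost).

-- ===== PORT A =====
-- A's while-loop, ported with a fuel bound; Pre_ restricts to inputs where
-- the Python loop terminates, and there the fuel suffices (proved below).
def krupaLoop : Nat → Int → Int → Int → Int → List Int → List Int
  | 0, _, _, _, _, acc => acc.reverse
  | f+1, s, stop, e, o, acc =>
    if s < stop then
      -- range_list.append(start); start = start + even_step
      if s + e < stop then
        -- range_list.append(start); start = start + odd_step
        krupaLoop f (s + e + o) stop e o ((s + e) :: s :: acc)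
      else
        krupaLoop f (s + e) stop e o (s :: acc)
    else acc.reverse

def gene_krupa_range (start : Int) (stop : Int) (even_step : Int) (odd_step : Int) : List Int :=
  krupaLoop ((stop - start).toNat + 2) start stop even_step odd_step []

-- ===== PORT B =====
-- the indexed for-loop over range(npairs) with an early break
def altEmit (start : Int) (stop : Int) (e : Int) (pair : Int) : List Int → List Int → List Int
  | [], out => out
  | j :: js, out =>
    let s := start + j * pair
    let out := out ++ [s]
    let t := s + e
    if stop ≤ t then out
    else altEmit start stop e pair js (out ++ [t])

def gene_krupa_range_alt (start : Int) (stop : Int) (even_step : Int) (odd_step : Int) : List Int :=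
  if stop ≤ start then []
  else
    let pair := even_step + odd_step
    if pair ≤ 0 then [start]
    else
      let npairs := -(PySem.Int.floordiv (start - stop) pair)
      altEmit start stop even_step pair (PySem.List.pyRange 0 npairs 1) []

-- ===== PRECONDITION & SPEC =====
-- Pre_ excludes exactly the inputs on which Python A never returns (the while
-- loop diverges): start < stop with start+even_step < stop and a non-positive
-- combined step; A returns a value on every input admitted here.
def Pre_gene_krupa_range (start : Int) (stop : Int) (even_step : Int) (odd_step : Int) : Prop :=
  stop ≤ start ∨ stop ≤ start + even_step ∨ 0 < even_step + odd_step
instance (start : Int) (stop : Int) (even_step : Int) (odd_step : Int) : Decidable (Pre_gene_krupa_range start stop even_step odd_step) := by unfold Pre_gene_krupa_range; infer_instance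
def pvWitness_gene_krupa_range : Int × Int × Int × Int := (0, 10, 3, 1)
def Spec_gene_krupa_range (start : Int) (stop : Int) (even_step : Int) (odd_step : Int) (out : List Int) : Prop := out = gene_krupa_range_alt start stop even_step odd_step
instance (start : Int) (stop : Int) (even_step : Int) (odd_step : Int) (out : List Int) : Decidable (Spec_gene_krupa_range start stop even_step odd_step out) := by unfold Spec_gene_krupa_range; infer_instance

-- ===== CLAIM (what is proved, stated in full; the proofs are below) =====
def Claim_equal_gene_krupa_range : Prop := ∀ (start : Int) (stop : Int) (even_step : Int) (odd_step : Int), Dom_gene_krupa_range start stop even_step odd_step → Pre_gene_krupa_range start stop even_step odd_step → Spec_gene_krupa_range start stop even_step odd_step (gene_krupa_range start stop even_step odd_step)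

-- ===== LEMMAS AND PROOFS =====

-- the common "spine": the list both programs produce, k pairs starting at s
def spine (stop : Int) (e : Int) (o : Int) : Nat → Int → List Int
  | 0, _ => []
  | k+1, s =>
    if s < stop then
      (if s + e < stop then s :: (s + e) :: spine stop e o k (s + e + o) else [s])
    else []

lemma krupaLoop_exit (f : Nat) (s stop e o : Int) (acc : List Int) (h : ¬ s < stop) :
    krupaLoop f s stop e o acc = acc.reverse := by
  cases f with
  | zero => rfl
  | succ f => simp [krupaLoop, h]

-- A's loop with enough fuel produces the spine
lemma krupaLoop_eq_spine (stop e o : Int) (k : Nat) :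
    ∀ (f : Nat) (s : Int) (acc : List Int), k ≤ f → stop ≤ s + k * (e + o) →
      krupaLoop f s stop e o acc = acc.reverse ++ spine stop e o k s := by
  induction k with
  | zero =>
    intro f s acc _ hk
    simp at hk
    rw [krupaLoop_exit f s stop e o acc (by omega)]
    simp [spine]
  | succ k ih =>
    intro f s acc hf hk
    obtain ⟨f', rfl⟩ : ∃ f', f = f' + 1 := ⟨f - 1, by omega⟩
    by_cases hs : s < stop
    · by_cases he : s + e < stop
      · simp only [krupaLoop, if_pos hs, if_pos he]
        rw [ih f' (s + e + o) ((s + e) :: s :: acc) (by omega)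
            (by push_cast at hk ⊢; linarith)]
        simp [spine, hs, he]
      · simp only [krupaLoop, if_pos hs, if_neg he]
        rw [krupaLoop_exit f' (s + e) stop e o (s :: acc) he]
        simp [spine, hs, he]
    · simp only [krupaLoop, if_neg hs]
      simp [spine, hs]

-- B's indexed emit over range(j0, j0+k) produces the spine at s = start + j0*pair
lemma altEmit_eq_spine (start stop e o : Int) (k : Nat) :
    ∀ (j0 : Int) (out : List Int),
      (∀ m : Nat, m < k → start + (j0 + m) * (e + o) < stop) →
      stop ≤ start + (j0 + k) * (e + o) →
      altEmit start stop e (e + o) (PySem.List.pyRange j0 (j0 + k) 1) out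
        = out ++ spine stop e o k (start + j0 * (e + o)) := by
  induction k with
  | zero =>
    intro j0 out _ _
    rw [PySem.List.pyRange_one_eq_nil (by omega)]
    simp [altEmit, spine]
  | succ k ih =>
    intro j0 out hlt hk
    rw [PySem.List.pyRange_one_cons (by omega)]
    have hs : start + j0 * (e + o) < stop := by
      have := hlt 0 (by omega); simpa using this
    show (if stop ≤ start + j0 * (e + o) + e then out ++ [start + j0 * (e + o)]
          else altEmit start stop e (e + o) (PySem.List.pyRange (j0 + 1) (j0 + ↑(k+1)) 1)
            ((out ++ [start + j0 * (e + o)]) ++ [start + j0 * (e + o) + e])) = _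
    by_cases he : start + j0 * (e + o) + e < stop
    · rw [if_neg (by omega)]
      have hcast : (j0 + ((k : Int) + 1)) = (j0 + 1) + (k : Int) := by ring
      rw [show (((k+1 : Nat)) : Int) = (k : Int) + 1 by push_cast; ring, hcast]
      rw [ih (j0 + 1) ((out ++ [start + j0 * (e + o)]) ++ [start + j0 * (e + o) + e])
          (fun m hm => by
            have := hlt (m + 1) (by omega)
            push_cast at this ⊢; linarith)
          (by push_cast at hk ⊢; linarith)]
      have harg : start + (j0 + 1) * (e + o) = start + j0 * (e + o) + e + o := by ring
      rw [harg]
      simp [spine, hs, he]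
    · rw [if_pos (by omega)]
      simp [spine, hs, he]

-- ===== VERDICT (by name: the statement is the Claim_ definition above) =====
theorem gene_krupa_range_spec : Claim_equal_gene_krupa_range := by
  intro start stop e o _ hpre
  unfold Spec_gene_krupa_range gene_krupa_range gene_krupa_range_alt
  by_cases h0 : stop ≤ start
  · rw [if_pos h0, krupaLoop_exit _ _ _ _ _ _ (by omega)]; rfl
  · rw [if_neg h0]
    by_cases hp : e + o ≤ 0
    · -- Pre_ forces stop ≤ start + e: A runs exactly one iteration
      rw [if_pos hp]
      have he : stop ≤ start + e := by
        rcases hpre with h | h | h <;> omega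
      show krupaLoop ((stop - start).toNat + 2) start stop e o [] = [start]
      have : (stop - start).toNat + 2 = ((stop - start).toNat + 1) + 1 := by omega
      rw [this]
      show (if start < stop then _ else _) = [start]
      rw [if_pos (by omega), if_neg (by omega),
          krupaLoop_exit _ _ _ _ _ _ (by omega)]
      rfl
    · rw [if_neg hp]
      have hp' : 0 < e + o := by omega
      set q : Int := -(PySem.Int.floordiv (start - stop) (e + o)) with hq
      have hbr : (q - 1) * (e + o) < stop - start ∧ stop - start ≤ q * (e + o) := by
        rw [← PySem.Int.neg_floordiv_neg_eq_iff_of_pos hp']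
        simp [hq]
      have hq1 : 1 ≤ q := by
        rcases hbr with ⟨h1, h2⟩
        by_contra hcon
        have hq0 : q ≤ 0 := by omega
        have := mul_le_mul_of_nonneg_right hq0 (le_of_lt hp')
        simp at this
        linarith
      set k : Nat := q.toNat with hk
      have hkq : (k : Int) = q := by omega
      -- B's side
      have hmem : ∀ m : Nat, m < k → start + ((0 : Int) + m) * (e + o) < stop := by
        intro m hm
        rcases hbr with ⟨h1, _⟩
        have hm' : (m : Int) ≤ q - 1 := by omega
        have hmul : (m : Int) * (e + o) ≤ (q - 1) * (e + o) :=
          mul_le_mul_of_nonneg_right hm' (by omega)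
        have : (0 : Int) + (m : Int) = (m : Int) := by ring
        rw [this]
        linarith
      have hend : stop ≤ start + ((0 : Int) + k) * (e + o) := by
        rcases hbr with ⟨_, h2⟩
        rw [hkq]
        have : (0 : Int) + q = q := by ring
        rw [this]
        linarith
      have hB : altEmit start stop e (e + o) (PySem.List.pyRange 0 q 1) []
          = spine stop e o k start := by
        have := altEmit_eq_spine start stop e o k 0 [] hmem hend
        simpa [hkq] using this
      -- A's side: fuel suffices since q ≤ stop - start
      have hqle : q ≤ stop - start := by
        rcases hbr with ⟨h1, _⟩
        have := mul_le_mul_of_nonneg_left (show (1:Int) ≤ e + o by omega)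
          (show (0:Int) ≤ q - 1 by omega)
        simp at this
        linarith
      have hA : krupaLoop ((stop - start).toNat + 2) start stop e o []
          = spine stop e o k start := by
        have := krupaLoop_eq_spine stop e o k ((stop - start).toNat + 2) start []
          (by omega)
          (by rcases hbr with ⟨_, h2⟩; rw [hkq]; linarith)
        simpa using this
      rw [hA, hB]
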